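-- pv_equiv track=rewrite | github.com/wylu/leetcodecn | src/python/p1700to1799/1752.检查数组是否经排序和轮转得到.py | check
-- ===== SOURCE A (Python) =====
-- from typing import List
--
-- def check(nums: List[int]) -> bool:
--     i, n = 1, len(nums)
--     while i < n and nums[i] >= nums[i - 1]:
--         i += 1
--
--     if i == n:
--         return True
--
--     def is_ordered(start: int, end: int) -> bool:
--         while start < end and nums[start] <= nums[start + 1]:
--             start += 1
--         return start == end
--
--     return (nums[0] >= nums[-1] and is_ordered(0, i - 1)
--             and is_ordered(i, n - 1))
-- ===== SOURCE B (Python) =====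
-- def check(nums):
--     # single pass: count circular descents; sorted-and-rotated iff at most one
--     prev = nums[0]
--     cnt = 0
--     for x in nums[1:]:
--         if x < prev:
--             cnt += 1
--         prev = x
--     if nums[-1] > nums[0]:
--         cnt += 1
--     return cnt <= 1
-- ===== Notes on version B (the rewrite author's own statement) =====
-- stated objective: simpler
-- what changed: Replaced A's find-break-point-then-verify-two-sorted-segments structure by a single pass that counts circular descents (adjacent drops plus the drop from the last element back to the first) and checks the count is at most 1.
import Mathlib
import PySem

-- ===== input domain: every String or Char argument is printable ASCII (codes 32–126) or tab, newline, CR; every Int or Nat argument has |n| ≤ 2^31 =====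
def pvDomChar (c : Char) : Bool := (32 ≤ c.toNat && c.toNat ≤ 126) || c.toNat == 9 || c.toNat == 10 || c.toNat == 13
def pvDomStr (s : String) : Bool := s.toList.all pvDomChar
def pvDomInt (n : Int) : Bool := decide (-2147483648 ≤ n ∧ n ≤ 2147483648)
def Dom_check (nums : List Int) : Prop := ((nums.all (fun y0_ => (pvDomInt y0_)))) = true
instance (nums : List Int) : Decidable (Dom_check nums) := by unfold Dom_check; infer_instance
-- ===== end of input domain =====

-- B replaces A's find-break-point-then-verify-two-sorted-segments scan by one pass counting
-- circular descents; equivalence of the RETURN values is proved for nonempty input (simpler).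

-- ===== PORT A =====
-- the initial while loop: advance i while i < n and the element at i is >= its predecessor
-- (indices are in range whenever read, so List.getD is exact here)
def checkWhile (nums : List Int) (n i : Nat) : Nat :=
  if i < n ∧ nums.getD (i - 1) 0 ≤ nums.getD i 0 then
    checkWhile nums n (i + 1)
  else i
termination_by n - i
decreasing_by omega

-- inner helper is_ordered(start, end)
def checkIsOrdered (nums : List Int) (start e : Nat) : Bool :=
  if start < e ∧ nums.getD start 0 ≤ nums.getD (start + 1) 0 then
    checkIsOrdered nums (start + 1) e
  else start == e
termination_by e - start
decreasing_by omega

def check (nums : List Int) : Bool :=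
  let n := nums.length
  let i := checkWhile nums n 1
  if i == n then true
  else
    -- compare first and last element; under Pre_ the list is nonempty, so the last index is n-1
    decide (nums.getD (n - 1) 0 ≤ nums.getD 0 0)
      && checkIsOrdered nums 0 (i - 1) && checkIsOrdered nums i (n - 1)

-- ===== PORT B =====
def check_alt (nums : List Int) : Bool :=
  let prev := nums.getD 0 0            -- first element, in range under Pre_
  let s := (nums.drop 1).foldl
      (fun (s : Nat × Int) x => (if x < s.2 then s.1 + 1 else s.1, x)) (0, prev)
  let cnt := if nums.getD 0 0 < nums.getD (nums.length - 1) 0 then s.1 + 1 else s.1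
  decide (cnt ≤ 1)

-- ===== PRECONDITION & SPEC =====
-- Pre_ excludes only the empty list, on which A (and B alike) raises IndexError at the first element access.
def Pre_check (nums : List Int) : Prop := nums ≠ []
instance (nums : List Int) : Decidable (Pre_check nums) := by unfold Pre_check; infer_instance
def pvWitness_check : List Int := [3, 4, 5, 1, 2]

def Spec_check (nums : List Int) (out : Bool) : Prop := out = check_alt nums
instance (nums : List Int) (out : Bool) : Decidable (Spec_check nums out) := by unfold Spec_check; infer_instance

-- ===== CLAIM (what is proved, stated in full; the proofs are below) =====
def Claim_equal_check : Prop := ∀ (nums : List Int), Dom_check nums → Pre_check nums → Spec_check nums (check nums)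

-- ===== LEMMAS AND PROOFS =====

-- characterisation of A's initial while loop
lemma checkWhile_spec (nums : List Int) (n : Nat) :
    ∀ i, 1 ≤ i →
    (∀ j, 1 ≤ j → j < i → nums.getD (j - 1) 0 ≤ nums.getD j 0) →
    i ≤ checkWhile nums n i ∧
    (checkWhile nums n i < n ∨ checkWhile nums n i = max i n) ∧
    (∀ j, 1 ≤ j → j < checkWhile nums n i → nums.getD (j - 1) 0 ≤ nums.getD j 0) ∧
    (checkWhile nums n i < n → ¬ nums.getD (checkWhile nums n i - 1) 0 ≤ nums.getD (checkWhile nums n i) 0) := by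
  intro i
  fun_induction checkWhile nums n i with
  | case1 i h ih =>
    intro hi hpre
    have hpre' : ∀ j, 1 ≤ j → j < i + 1 → nums.getD (j - 1) 0 ≤ nums.getD j 0 := by
      intro j h1 h2
      rcases Nat.lt_or_ge j i with hj | hj
      · exact hpre j h1 hj
      · have : j = i := by omega
        subst this; exact h.2
    obtain ⟨a1, a2, a3, a4⟩ := ih (by omega) hpre'
    refine ⟨by omega, ?_, a3, a4⟩
    rcases a2 with a2 | a2
    · left; exact a2
    · right; omega
  | case2 i h =>
    intro hi hpre
    refine ⟨le_refl _, ?_, hpre, ?_⟩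
    · by_cases hn : i < n
      · left; exact hn
      · right; omega
    · intro hn hle; exact h ⟨hn, hle⟩

-- characterisation of A's is_ordered helper
lemma checkIsOrdered_spec (nums : List Int) (e : Nat) :
    ∀ s, s ≤ e →
    (checkIsOrdered nums s e = true ↔
      ∀ j, s ≤ j → j < e → nums.getD j 0 ≤ nums.getD (j + 1) 0) := by
  intro s
  fun_induction checkIsOrdered nums s e with
  | case1 s h ih =>
    intro _
    rw [ih (by omega)]
    constructor
    · intro hall j h1 h2
      rcases Nat.lt_or_ge j s with hj | hj
      · omega
      · rcases Nat.lt_or_ge j (s + 1) with hj' | hj'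
        · have : j = s := by omega
          subst this; exact h.2
        · exact hall j hj' h2
    · intro hall j h1 h2; exact hall j (by omega) h2
  | case2 s h =>
    intro hse
    by_cases heq : s = e
    · subst heq
      simp only [BEq.rfl, true_iff]
      intro j h1 h2; omega
    · have hlt : s < e := by omega
      have hns : ¬ nums.getD s 0 ≤ nums.getD (s + 1) 0 := fun hle => h ⟨hlt, hle⟩
      constructor
      · intro hc
        exfalso
        have : s = e := by simpa using hc
        omega
      · intro hall
        exact absurd (hall s (le_refl _) hlt) hns

-- B's fold counts the adjacent descents
lemma foldl_cnt (l : List Int) : ∀ (prev : Int) (c : Nat),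
    (l.foldl (fun (s : Nat × Int) x => (if x < s.2 then s.1 + 1 else s.1, x)) (c, prev)).1
    = c + (List.range l.length).countP
        (fun j => decide (l.getD j 0 < (prev :: l).getD j 0)) := by
  induction l with
  | nil => intro prev c; simp
  | cons x xs ih =>
    intro prev c
    simp only [List.foldl_cons, List.length_cons, List.range_succ_eq_map,
      List.countP_cons, List.countP_map, Function.comp_def, Nat.succ_eq_add_one,
      List.getD_cons_succ, List.getD_cons_zero, decide_eq_true_eq]
    rw [ih x (if x < prev then c + 1 else c)]
    split_ifs <;> omega

-- ===== VERDICT (by name: the statement is the Claim_ definition above) =====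
theorem check_spec : Claim_equal_check := by
  intro nums _ hpre
  unfold Spec_check
  cases nums with
  | nil => exact absurd rfl hpre
  | cons a t =>
    obtain ⟨hr1, hr2, hr3, hr4⟩ :=
      checkWhile_spec (a :: t) (t.length + 1) 1 (le_refl 1) (by intro j h1 h2; omega)
    set r := checkWhile (a :: t) (t.length + 1) 1 with hrdef
    have hshift : ∀ j : Nat, t.getD j 0 = (a :: t).getD (j + 1) 0 := by
      intro j; simp
    set P : Nat → Bool := fun j => decide (t.getD j 0 < (a :: t).getD j 0) with hP
    have halt : check_alt (a :: t)
        = decide ((List.range t.length).countP P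
            + (if a < (a :: t).getD t.length 0 then 1 else 0) ≤ 1) := by
      simp only [check_alt, List.getD_cons_zero, List.drop_succ_cons, List.drop_zero,
        List.length_cons, Nat.add_sub_cancel]
      rw [foldl_cnt]
      rw [decide_eq_decide]
      simp only [hP]
      split_ifs <;> omega
    by_cases hrn : r = t.length + 1
    · -- the while loop ran to the end: the whole list is sorted
      have hc : check (a :: t) = true := by
        simp only [check, List.length_cons, ← hrdef]
        rw [if_pos (by simp [hrn])]
      have hC0 : (List.range t.length).countP P = 0 := by
        rw [List.countP_eq_zero]
        intro j hj
        rw [List.mem_range] at hj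
        simp only [hP, decide_eq_true_eq, not_lt]
        rw [hshift j]
        have h' := hr3 (j + 1) (by omega) (by omega)
        rw [Nat.add_sub_cancel] at h'
        exact h'
      rw [hc, halt, hC0]
      rw [eq_comm, decide_eq_true_eq]
      split_ifs <;> omega
    · -- the loop stopped at the first descent r
      have hrn' : r < t.length + 1 := by
        rcases hr2 with h | h
        · omega
        · omega
      have hc : check (a :: t)
          = (decide ((a :: t).getD t.length 0 ≤ a)
             && checkIsOrdered (a :: t) 0 (r - 1) && checkIsOrdered (a :: t) r t.length) := by
        simp only [check, List.length_cons, ← hrdef, Nat.add_sub_cancel, List.getD_cons_zero]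
        rw [if_neg (by simp [hrn])]
      have hord1 : checkIsOrdered (a :: t) 0 (r - 1) = true := by
        rw [checkIsOrdered_spec (a :: t) (r - 1) 0 (by omega)]
        intro j _ h2
        have h' := hr3 (j + 1) (by omega) (by omega)
        rw [Nat.add_sub_cancel] at h'
        exact h'
      -- split the descent count: 0 before r-1, 1 at r-1, the rest after r
      have hsplit : t.length = (r - 1) + 1 + (t.length - r) := by omega
      have hCsplit : (List.range t.length).countP P
          = ((List.range (r - 1)).countP P + (if P (r - 1) then 1 else 0))
            + (List.range (t.length - r)).countP (fun j => P ((r - 1) + 1 + j)) := by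
        conv_lhs => rw [hsplit]
        rw [List.range_add, List.countP_append, List.range_succ,
          List.countP_append, List.countP_map]
        simp [Function.comp_def]
      have hpre0 : (List.range (r - 1)).countP P = 0 := by
        rw [List.countP_eq_zero]
        intro j hj
        rw [List.mem_range] at hj
        simp only [hP, decide_eq_true_eq, not_lt]
        rw [hshift j]
        have h' := hr3 (j + 1) (by omega) (by omega)
        rw [Nat.add_sub_cancel] at h'
        exact h'
      have hPr : P (r - 1) = true := by
        simp only [hP, decide_eq_true_eq]
        rw [hshift (r - 1)]
        have h4 := hr4 (by omega)
        have hr1' : r - 1 + 1 = r := by omega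
        rw [hr1']
        omega
      set C2 : Nat := (List.range (t.length - r)).countP (fun j => P ((r - 1) + 1 + j)) with hC2
      have hiff : (C2 = 0) ↔ checkIsOrdered (a :: t) r t.length = true := by
        rw [checkIsOrdered_spec (a :: t) t.length r (by omega), hC2, List.countP_eq_zero]
        constructor
        · intro hz k hk1 hk2
          have h' := hz (k - r) (by rw [List.mem_range]; omega)
          simp only [hP, decide_eq_true_eq] at h'
          rw [hshift (r - 1 + 1 + (k - r))] at h'
          have he1 : r - 1 + 1 + (k - r) = k := by omega
          rw [he1] at h'
          omega
        · intro hall j hj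
          rw [List.mem_range] at hj
          simp only [hP, decide_eq_true_eq, not_lt]
          rw [hshift (r - 1 + 1 + j)]
          have he1 : r - 1 + 1 + j = r + j := by omega
          rw [he1]
          exact hall (r + j) (by omega) (by omega)
      rw [hc, halt, hord1, Bool.and_true, hCsplit, hpre0]
      simp only [hPr, if_true]
      by_cases h2 : checkIsOrdered (a :: t) r t.length = true
      · have hc2 : C2 = 0 := hiff.mpr h2
        rw [h2, Bool.and_true, hc2]
        rw [decide_eq_decide]
        split_ifs <;> omega
      · have h2' : checkIsOrdered (a :: t) r t.length = false := by
          simpa using h2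
        have hc2 : C2 ≠ 0 := fun h => h2 (hiff.mp h)
        rw [h2', Bool.and_false, eq_comm, decide_eq_false_iff_not]
        split_ifs <;> omega
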